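-- pv_equiv track=rewrite | github.com/jalexanderbryant/python-practice | quick-hacks/sort/count_sort_features.py | count_features
-- ===== SOURCE A (Python) =====
-- def count_features(lines):
--     if len(lines) == 0:
--         return 0;
--     else:
--         line = lines[0].strip()
--
--         if len(line) > 1 and line[0] == '-':
--             return 1 + count_features(lines[1:])
--         else:
--             return 0 + count_features(lines[1:])
-- ===== SOURCE B (Python) =====
-- def count_features(lines):
--     count = 0
--     for line in lines:
--         stripped = line.strip()
--         if len(stripped) > 1 and stripped[0] == '-':
--             count += 1
--     return count
-- ===== Notes on version B (the rewrite author's own statement) =====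
-- stated objective: faster
-- what changed: Replaced the recursion that rebuilds the tail list lines[1:] at every step with a single iterative pass using a counter accumulator; no list slicing and no recursion depth.
import Mathlib
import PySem

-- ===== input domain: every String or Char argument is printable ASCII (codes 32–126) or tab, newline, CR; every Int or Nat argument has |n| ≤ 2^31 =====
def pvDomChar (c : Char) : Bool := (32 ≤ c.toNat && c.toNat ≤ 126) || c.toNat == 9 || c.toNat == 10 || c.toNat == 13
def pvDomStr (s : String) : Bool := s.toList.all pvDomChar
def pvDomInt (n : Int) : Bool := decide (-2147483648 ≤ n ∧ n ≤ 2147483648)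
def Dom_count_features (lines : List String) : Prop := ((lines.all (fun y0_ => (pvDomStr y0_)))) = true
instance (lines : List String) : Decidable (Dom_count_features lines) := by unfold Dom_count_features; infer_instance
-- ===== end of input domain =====

-- B replaces A's recursion (which slices off lines[1:] at each call) with one iterative pass and a counter; same predicate, same result.

-- ===== PORT A =====
def count_features (lines : List String) : Int :=
  match lines with
  | [] => 0
  | l :: rest =>
    let line := PySem.Str.strip l
    if PySem.Str.len line > 1 && PySem.Str.pyGet? line 0 == some '-' then
      1 + count_features rest
    else
      0 + count_features rest

-- ===== PORT B =====
def count_features_alt (lines : List String) : Int :=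
  lines.foldl (fun count l =>
    let stripped := PySem.Str.strip l
    if PySem.Str.len stripped > 1 && PySem.Str.pyGet? stripped 0 == some '-' then
      count + 1
    else
      count) 0

-- ===== PRECONDITION & SPEC =====
def Spec_count_features (lines : List String) (out : Int) : Prop := out = count_features_alt lines
instance (lines : List String) (out : Int) : Decidable (Spec_count_features lines out) := by unfold Spec_count_features; infer_instance

-- ===== CLAIM (what is proved, stated in full; the proofs are below) =====
def Claim_equal_count_features : Prop := ∀ (lines : List String), Dom_count_features lines → Spec_count_features lines (count_features lines)

-- ===== LEMMAS AND PROOFS =====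
theorem count_features_alt_foldl (lines : List String) (c : Int) :
    lines.foldl (fun count l =>
      let stripped := PySem.Str.strip l
      if PySem.Str.len stripped > 1 && PySem.Str.pyGet? stripped 0 == some '-' then
        count + 1
      else
        count) c = c + count_features lines := by
  induction lines generalizing c with
  | nil => simp [count_features]
  | cons l rest ih =>
    simp only [List.foldl_cons, count_features]
    split <;> rw [ih] <;> ring

-- ===== VERDICT (by name: the statement is the Claim_ definition above) =====
theorem count_features_spec : Claim_equal_count_features := by
  intro lines _
  unfold Spec_count_features count_features_alt
  rw [count_features_alt_foldl]
  ring
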